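-- pv_equiv track=rewrite | github.com/d-v-b/data-model | src/eopf_geozarr/s2_optimization/s2_multiscale.py | calculate_aligned_chunk_size
-- ===== SOURCE A (Python) =====
-- def calculate_aligned_chunk_size(dimension_size: int, target_chunk: int) -> int:
--     """
--     Calculate aligned chunk size following geozarr.py logic.
--
--     This ensures good chunk alignment without complex calculations.
--     """
--     if target_chunk >= dimension_size:
--         return dimension_size
--
--     # Find the largest divisor of dimension_size that's close to target_chunk
--     best_chunk = target_chunk
--     for chunk_candidate in range(target_chunk, max(target_chunk // 2, 1), -1):
--         if dimension_size % chunk_candidate == 0: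
--             best_chunk = chunk_candidate
--             break
--
--     return best_chunk
-- ===== SOURCE B (Python) =====
-- def calculate_aligned_chunk_size(dimension_size: int, target_chunk: int) -> int:
--     """Same result as A, but via sqrt-bounded divisor enumeration instead of a downward scan."""
--     if target_chunk >= dimension_size:
--         return dimension_size
--     lo = max(target_chunk // 2, 1)
--     divisors = []
--     i = 1
--     while i * i <= dimension_size:
--         if dimension_size % i == 0:
--             divisors.append(i)
--             divisors.append(dimension_size // i)
--         i += 1
--     candidates = [d for d in divisors if lo < d <= target_chunk]
--     return max(candidates) if candidates else target_chunk
-- ===== Notes on version B (the rewrite author's own statement) =====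
-- stated objective: faster
-- what changed: Replaces A's downward scan over up to target_chunk//2 candidates with a sqrt-bounded trial-division enumeration of dimension_size's divisors, then a filter to (target_chunk//2, target_chunk] and a max with fallback target_chunk.
import Mathlib
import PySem

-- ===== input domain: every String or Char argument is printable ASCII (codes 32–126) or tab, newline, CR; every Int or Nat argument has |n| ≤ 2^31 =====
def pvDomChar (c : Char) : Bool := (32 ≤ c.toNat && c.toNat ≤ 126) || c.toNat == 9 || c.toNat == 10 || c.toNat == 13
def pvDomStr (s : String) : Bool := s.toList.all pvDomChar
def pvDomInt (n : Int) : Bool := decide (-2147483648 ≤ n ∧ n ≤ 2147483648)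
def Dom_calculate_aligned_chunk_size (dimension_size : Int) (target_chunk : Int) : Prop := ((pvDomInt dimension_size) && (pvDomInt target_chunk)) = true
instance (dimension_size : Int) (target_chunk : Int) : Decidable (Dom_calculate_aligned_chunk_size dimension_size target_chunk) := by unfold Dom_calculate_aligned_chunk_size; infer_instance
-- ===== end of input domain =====

-- B replaces A's downward candidate scan by a sqrt-bounded divisor enumeration of dimension_size (objective: faster — O(sqrt(dimension_size)) divisor enumeration instead of an O(target_chunk) scan).

-- ===== PORT A =====
-- the `for … break` loop of A: first candidate dividing dimension_size, else best_chunk stays target_chunk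
def pvALoop (dimension_size : Int) (best : Int) : List Int → Int
  | [] => best
  | c :: rest => if PySem.Int.mod dimension_size c = 0 then c else pvALoop dimension_size best rest

def calculate_aligned_chunk_size (dimension_size : Int) (target_chunk : Int) : Int :=
  if target_chunk ≥ dimension_size then dimension_size
  else
    pvALoop dimension_size target_chunk
      (PySem.List.pyRange target_chunk (max (PySem.Int.floordiv target_chunk 2) 1) (-1))

-- ===== PORT B =====
-- the `while i * i <= dimension_size` loop of Source B, appending i and dimension_size // i for each hit
def pvBDivs (n : Int) (i : Nat) (acc : List Int) : Nat → List Int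
  | 0 => acc
  | fuel + 1 =>
    if (i : Int) * i ≤ n then
      pvBDivs n (i + 1)
        (if PySem.Int.mod n i = 0 then acc ++ [(i : Int), PySem.Int.floordiv n i] else acc) fuel
    else acc

def calculate_aligned_chunk_size_alt (dimension_size : Int) (target_chunk : Int) : Int :=
  if target_chunk ≥ dimension_size then dimension_size
  else
    let lo := max (PySem.Int.floordiv target_chunk 2) 1
    let divisors := pvBDivs dimension_size 1 [] (dimension_size.toNat + 1)
    let candidates := divisors.filter (fun d => lo < d && d ≤ target_chunk)
    match candidates.max? with
    | some m => m
    | none => target_chunk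

-- ===== PRECONDITION & SPEC =====
def Spec_calculate_aligned_chunk_size (dimension_size : Int) (target_chunk : Int) (out : Int) : Prop := out = calculate_aligned_chunk_size_alt dimension_size target_chunk
instance (dimension_size : Int) (target_chunk : Int) (out : Int) : Decidable (Spec_calculate_aligned_chunk_size dimension_size target_chunk out) := by unfold Spec_calculate_aligned_chunk_size; infer_instance

-- ===== CLAIM (what is proved, stated in full; the proofs are below) =====
def Claim_equal_calculate_aligned_chunk_size : Prop := ∀ (dimension_size : Int) (target_chunk : Int), Dom_calculate_aligned_chunk_size dimension_size target_chunk → Spec_calculate_aligned_chunk_size dimension_size target_chunk (calculate_aligned_chunk_size dimension_size target_chunk)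

-- ===== LEMMAS AND PROOFS =====

-- membership in the accumulator of B's divisor loop
theorem mem_pvBDivs (n : Int) (fuel : Nat) (i : Nat) (acc : List Int) (x : Int) :
    x ∈ pvBDivs n i acc fuel ↔ x ∈ acc ∨ ∃ j : Nat, i ≤ j ∧ j < i + fuel ∧ (j : Int) * j ≤ n ∧
      PySem.Int.mod n j = 0 ∧ (x = (j : Int) ∨ x = PySem.Int.floordiv n j) := by
  induction fuel generalizing i acc with
  | zero =>
    simp only [pvBDivs]
    constructor
    · exact Or.inl
    · rintro (hx | ⟨j, hj1, hj2, _⟩)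
      · exact hx
      · omega
  | succ fuel ih =>
    rw [pvBDivs]
    by_cases h : (i : Int) * i ≤ n
    · rw [if_pos h, ih]
      by_cases hm : PySem.Int.mod n (i : Int) = 0
      · rw [if_pos hm]
        simp only [List.mem_append, List.mem_cons, List.not_mem_nil, or_false]
        constructor
        · rintro ((hx | (hx | hx)) | ⟨j, hj1, hj2, hj3, hj4, hj5⟩)
          · exact Or.inl hx
          · exact Or.inr ⟨i, le_refl _, by omega, h, hm, Or.inl hx⟩
          · exact Or.inr ⟨i, le_refl _, by omega, h, hm, Or.inr hx⟩
          · exact Or.inr ⟨j, by omega, by omega, hj3, hj4, hj5⟩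
        · rintro (hx | ⟨j, hj1, hj2, hj3, hj4, hj5⟩)
          · exact Or.inl (Or.inl hx)
          · rcases Nat.eq_or_lt_of_le hj1 with hji | hji
            · subst hji; rcases hj5 with h5 | h5
              · exact Or.inl (Or.inr (Or.inl h5))
              · exact Or.inl (Or.inr (Or.inr h5))
            · exact Or.inr ⟨j, by omega, by omega, hj3, hj4, hj5⟩
      · rw [if_neg hm]
        constructor
        · rintro (hx | ⟨j, hj1, hj2, hj3, hj4, hj5⟩)
          · exact Or.inl hx
          · exact Or.inr ⟨j, by omega, by omega, hj3, hj4, hj5⟩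
        · rintro (hx | ⟨j, hj1, hj2, hj3, hj4, hj5⟩)
          · exact Or.inl hx
          · rcases Nat.eq_or_lt_of_le hj1 with hji | hji
            · subst hji; exact absurd hj4 hm
            · exact Or.inr ⟨j, by omega, by omega, hj3, hj4, hj5⟩
    · rw [if_neg h]
      constructor
      · exact Or.inl
      · rintro (hx | ⟨j, hj1, hj2, hj3, _⟩)
        · exact hx
        · exfalso
          apply h
          calc (i : Int) * i ≤ (j : Int) * j := by
                have := Nat.mul_le_mul hj1 hj1
                exact_mod_cast this
            _ ≤ n := hj3

-- for n ≥ 1 the loop (run with enough fuel) collects exactly the positive divisors of n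
theorem mem_pvBDivs_one (n : Int) (hn : 1 ≤ n) (x : Int) :
    x ∈ pvBDivs n 1 [] (n.toNat + 1) ↔ 1 ≤ x ∧ x ∣ n := by
  rw [mem_pvBDivs]
  simp only [List.not_mem_nil, false_or]
  constructor
  · rintro ⟨j, hj1, hj2, hj3, hj4, hj5⟩
    have hjpos : (0 : Int) < (j : Int) := by exact_mod_cast hj1
    have hdvd : (j : Int) ∣ n := (PySem.Int.mod_eq_zero_iff_dvd n j).mp hj4
    have hjn : (j : Int) ≤ n := by nlinarith
    rcases hj5 with h5 | h5
    · exact ⟨by omega, by rw [h5]; exact hdvd⟩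
    · rw [h5, PySem.Int.floordiv_eq_ediv_of_pos hjpos]
      constructor
      · rw [Int.le_ediv_iff_mul_le hjpos]; omega
      · exact ⟨j, (Int.ediv_mul_cancel hdvd).symm⟩
  · rintro ⟨hx1, hdvd⟩
    obtain ⟨y, hxy⟩ := hdvd
    have hxn : x ≤ n := Int.le_of_dvd (by omega) ⟨y, hxy⟩
    have hy1 : 1 ≤ y := by
      by_contra hy
      push Not at hy
      nlinarith
    have hyn : y ≤ n := Int.le_of_dvd (by omega) ⟨x, by rw [hxy, mul_comm]⟩
    by_cases hsq : x * x ≤ n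
    · refine ⟨x.toNat, by omega, by omega, ?_, ?_, Or.inl (by omega)⟩
      · rw [(by omega : ((x.toNat : Int)) = x)]; exact hsq
      · rw [(by omega : ((x.toNat : Int)) = x), PySem.Int.mod_eq_zero_iff_dvd]; exact ⟨y, hxy⟩
    · have hxylt : x * y < x * x := by omega
      have hylt : y < x := lt_of_mul_lt_mul_left hxylt (by omega)
      have hysq : y * y ≤ n := by nlinarith
      have hyd : y ∣ n := ⟨x, by rw [hxy, mul_comm]⟩
      refine ⟨y.toNat, by omega, by omega, ?_, ?_, Or.inr ?_⟩
      · rw [(by omega : ((y.toNat : Int)) = y)]; exact hysq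
      · rw [(by omega : ((y.toNat : Int)) = y), PySem.Int.mod_eq_zero_iff_dvd]; exact hyd
      · rw [(by omega : ((y.toNat : Int)) = y),
          PySem.Int.floordiv_eq_ediv_of_pos (by omega : (0:Int) < y), hxy, mul_comm]
        exact (Int.mul_ediv_cancel_left _ (by omega : y ≠ 0)).symm

-- find? on a strictly descending list returns the greatest satisfying element
theorem find?_desc_some {L : List Int} {p : Int → Bool} (hL : L.Pairwise (· > ·)) {m : Int}
    (hfind : L.find? p = some m) : m ∈ L ∧ p m = true ∧ ∀ c ∈ L, p c = true → c ≤ m := by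
  induction L with
  | nil => simp at hfind
  | cons a L ih =>
    rcases List.pairwise_cons.mp hL with ⟨ha, hL'⟩
    by_cases hpa : p a = true
    · rw [List.find?_cons_of_pos hpa] at hfind
      cases hfind
      refine ⟨List.mem_cons_self, hpa, ?_⟩
      intro c hc _
      rcases List.mem_cons.mp hc with rfl | hc'
      · exact le_refl _
      · exact le_of_lt (ha c hc')
    · rw [List.find?_cons_of_neg (by simpa using hpa)] at hfind
      obtain ⟨h1, h2, h3⟩ := ih hL' hfind
      refine ⟨List.mem_cons_of_mem _ h1, h2, ?_⟩
      intro c hc hpc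
      rcases List.mem_cons.mp hc with rfl | hc'
      · exact absurd hpc hpa
      · exact h3 c hc' hpc

-- A's for-loop is find? with default
theorem pvALoop_eq_find? (n b : Int) (L : List Int) :
    pvALoop n b L = ((L.find? (fun c => decide (PySem.Int.mod n c = 0))).getD b) := by
  induction L with
  | nil => rfl
  | cons c L ih =>
    rw [pvALoop]
    by_cases hm : PySem.Int.mod n c = 0
    · rw [if_pos hm, List.find?_cons_of_pos (by simpa using hm)]; rfl
    · rw [if_neg hm, List.find?_cons_of_neg (by simpa using hm), ih]

-- the countdown range is strictly descending
theorem pairwise_gt_pyRange_neg_one (a b : Int) :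
    (PySem.List.pyRange a b (-1)).Pairwise (· > ·) := by
  rw [PySem.List.pyRange_neg_one_eq_reverse, List.pairwise_reverse]
  exact PySem.List.pairwise_lt_pyRange_one _ _

-- ===== VERDICT (by name: the statement is the Claim_ definition above) =====
theorem calculate_aligned_chunk_size_spec : Claim_equal_calculate_aligned_chunk_size := by
  intro n tc _
  unfold Spec_calculate_aligned_chunk_size calculate_aligned_chunk_size calculate_aligned_chunk_size_alt
  by_cases hge : tc ≥ n
  · rw [if_pos hge, if_pos hge]
  · rw [if_neg hge, if_neg hge]
    have hlt : tc < n := by omega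
    set lo := max (PySem.Int.floordiv tc 2) 1 with hlo
    have hlo1 : 1 ≤ lo := le_max_right _ _
    set p : Int → Bool := fun c => decide (PySem.Int.mod n c = 0) with hp
    rw [pvALoop_eq_find?]
    by_cases htc : tc ≤ 1
    · -- tiny target: both ranges empty, both return target_chunk
      rw [PySem.List.pyRange_neg_one_eq_nil (by omega)]
      have hcand : (pvBDivs n 1 [] (n.toNat + 1)).filter (fun d => lo < d && d ≤ tc) = [] := by
        rw [List.filter_eq_nil_iff]
        intro d _ hd
        simp only [Bool.and_eq_true, decide_eq_true_eq] at hd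
        omega
      simp only [hcand, List.find?_nil, Option.getD_none, List.max?_nil]
    · -- tc ≥ 2, so n ≥ 3; relate the descending scan to the divisor enumeration
      have htc2 : 2 ≤ tc := by omega
      have hn1 : 1 ≤ n := by omega
      have hmemF : ∀ d, d ∈ (pvBDivs n 1 [] (n.toNat + 1)).filter (fun d => lo < d && d ≤ tc) ↔
          (lo < d ∧ d ≤ tc ∧ d ∣ n) := by
        intro d
        rw [List.mem_filter, mem_pvBDivs_one n hn1]
        simp only [Bool.and_eq_true, decide_eq_true_eq]
        constructor
        · rintro ⟨⟨_, hd⟩, h1, h2⟩; exact ⟨h1, h2, hd⟩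
        · rintro ⟨h1, h2, hd⟩; exact ⟨⟨by omega, hd⟩, h1, h2⟩
      cases hF : (PySem.List.pyRange tc lo (-1)).find? p with
      | none =>
        rw [List.find?_eq_none] at hF
        have hcand : (pvBDivs n 1 [] (n.toNat + 1)).filter (fun d => lo < d && d ≤ tc) = [] := by
          rw [List.filter_eq_nil_iff]
          intro d hd hdc
          simp only [Bool.and_eq_true, decide_eq_true_eq] at hdc
          have hdvd := ((mem_pvBDivs_one n hn1 d).mp hd).2
          have := hF d (PySem.List.mem_pyRange_neg_one.mpr ⟨hdc.1, hdc.2⟩)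
          rw [hp] at this
          simp only [decide_eq_true_eq] at this
          exact this ((PySem.Int.mod_eq_zero_iff_dvd n d).mpr hdvd)
        simp only [hcand, List.max?_nil, Option.getD_none]
      | some m =>
        obtain ⟨hmL, hpm, hmax⟩ := find?_desc_some (pairwise_gt_pyRange_neg_one tc lo) hF
        rw [PySem.List.mem_pyRange_neg_one] at hmL
        rw [hp] at hpm
        simp only [decide_eq_true_eq] at hpm
        have hmdvd : m ∣ n := (PySem.Int.mod_eq_zero_iff_dvd n m).mp hpm
        have hmax' : ((pvBDivs n 1 [] (n.toNat + 1)).filter (fun d => lo < d && d ≤ tc)).max? = some m := by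
          rw [List.max?_eq_some_iff]
          refine ⟨(hmemF m).mpr ⟨hmL.1, hmL.2, hmdvd⟩, ?_⟩
          intro b hb
          obtain ⟨hb1, hb2, hbd⟩ := (hmemF b).mp hb
          exact hmax b (PySem.List.mem_pyRange_neg_one.mpr ⟨hb1, hb2⟩)
            (by rw [hp]; simp only [decide_eq_true_eq]; exact (PySem.Int.mod_eq_zero_iff_dvd n b).mpr hbd)
        simp only [hmax', Option.getD_some]
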